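-- pv_equiv track=rewrite | github.com/BiolApps/VaccineDesigner | Generate_multiepitope_fnc.py | multiepitope_vaccine
-- ===== SOURCE A (Python) =====
-- def epitope_combinations(sequence,list_epitopes):
--     new_seqs=[]
--     for i in list_epitopes:
--         temp=sequence+i
--         new_seqs.append(temp)
--     return new_seqs
--
-- def multiepitope_vaccine(components,order,start=''):
--     vaccines=[]
--     subunit=[]
--     for j in range(len(order)):
--         comp_j=components[order[j]]
--         if len(comp_j)==0:
--             continue
--         if len(subunit)==0:
--             for i in comp_j:
--                 subunit.append(i)
--         else:
--             new_ls=[]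
--             for i in subunit:
--                 temp_seqs=epitope_combinations(i,comp_j)
--                 new_ls.extend(temp_seqs)
--             subunit=new_ls
--     subunit=[start+i for i in subunit]
--     return subunit
-- ===== SOURCE B (Python) =====
-- def multiepitope_vaccine(components, order, start=''):
--     sel = [components[k] for k in order if len(components[k]) > 0]
--     if not sel:
--         return []
--     total = 1
--     for c in sel:
--         total *= len(c)
--     out = []
--     for n in range(total):
--         parts = []
--         for c in reversed(sel):
--             n, r = divmod(n, len(c))
--             parts.append(c[r])
--         out.append(start + ''.join(reversed(parts)))
--     return out
-- ===== Notes on version B (the rewrite author's own statement) =====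
-- stated objective: alternative
-- what changed: B enumerates output indices 0..total-1 and decodes each index into component choices by repeated divmod (mixed-radix decoding), instead of A's iterative rebuilding of a growing prefix list per component.
import Mathlib
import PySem

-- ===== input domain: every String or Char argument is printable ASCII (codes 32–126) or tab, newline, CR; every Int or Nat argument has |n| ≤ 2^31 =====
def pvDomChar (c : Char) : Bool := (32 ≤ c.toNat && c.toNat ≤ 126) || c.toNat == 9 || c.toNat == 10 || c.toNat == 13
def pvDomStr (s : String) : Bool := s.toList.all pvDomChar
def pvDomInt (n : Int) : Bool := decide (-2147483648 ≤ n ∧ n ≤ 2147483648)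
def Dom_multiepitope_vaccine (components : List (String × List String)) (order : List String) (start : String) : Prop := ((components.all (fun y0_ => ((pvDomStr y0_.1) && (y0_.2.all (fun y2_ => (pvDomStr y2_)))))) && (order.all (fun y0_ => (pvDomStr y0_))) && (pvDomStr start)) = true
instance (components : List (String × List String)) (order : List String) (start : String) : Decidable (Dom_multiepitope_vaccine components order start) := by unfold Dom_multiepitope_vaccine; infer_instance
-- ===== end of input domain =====

-- B enumerates the output by index: it counts the total number of combinations and decodes each
-- index n into one selection per component by repeated divmod (mixed-radix digits), instead of A's
-- iterative rebuilding of a growing prefix list (objective: alternative).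
-- A raises KeyError when a key of `order` is missing from `components`; Pre_ excludes exactly those inputs.

-- dict lookup components[k]: first match in the association list (default [] only totalizes
-- the KeyError case, which Pre_ excludes)
def pvLookup (components : List (String × List String)) (k : String) : List String :=
  ((PySem.Dict.mk components).get? k).getD []

-- ===== PORT A =====
def epitope_combinations (sequence : String) (list_epitopes : List String) : List String :=
  list_epitopes.foldl (fun new_seqs i => new_seqs ++ [sequence ++ i]) []

def multiepitope_vaccine (components : List (String × List String)) (order : List String) (start : String) : List String :=
  let subunit := order.foldl (fun subunit k =>
    let comp_j := pvLookup components k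
    if comp_j.length == 0 then subunit
    else if subunit.length == 0 then comp_j.foldl (fun s i => s ++ [i]) subunit
    else subunit.foldl (fun new_ls i => new_ls ++ epitope_combinations i comp_j) []) []
  subunit.map (fun i => start ++ i)

-- ===== PORT B =====
-- c[r]: the index r = n % len(c) always satisfies 0 ≤ r < len(c) here (len(c) > 0 by the filter),
-- so pyGetD's default "" is never used and the port is exact.
def multiepitope_vaccine_alt (components : List (String × List String)) (order : List String) (start : String) : List String :=
  let sel := (order.map (fun k => pvLookup components k)).filter (fun c => 0 < c.length)
  if sel.isEmpty then []
  else
    let total := sel.foldl (fun p c => p * PySem.List.len c) 1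
    (PySem.List.pyRange 0 total 1).map (fun n =>
      let st := sel.reverse.foldl
        (fun (st : Int × List String) c =>
          (PySem.Int.floordiv st.1 (PySem.List.len c),
           st.2 ++ [PySem.List.pyGetD c (PySem.Int.mod st.1 (PySem.List.len c)) ""]))
        (n, [])
      start ++ PySem.Str.join "" st.2.reverse)

-- ===== PRECONDITION & SPEC =====
-- Pre_ excludes exactly the inputs where A raises KeyError: some key of `order` is absent from `components`.
def Pre_multiepitope_vaccine (components : List (String × List String)) (order : List String) (start : String) : Prop :=
  (order.all (fun k => (PySem.Dict.mk components).contains k)) = true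
instance (components : List (String × List String)) (order : List String) (start : String) : Decidable (Pre_multiepitope_vaccine components order start) := by unfold Pre_multiepitope_vaccine; infer_instance

def pvWitness_multiepitope_vaccine : (List (String × List String)) × List String × String :=
  ([("a", ["GG", "H"]), ("b", ["K"])], ["a", "b", "a"], "M")

def Spec_multiepitope_vaccine (components : List (String × List String)) (order : List String) (start : String) (out : List String) : Prop := out = multiepitope_vaccine_alt components order start
instance (components : List (String × List String)) (order : List String) (start : String) (out : List String) : Decidable (Spec_multiepitope_vaccine components order start out) := by unfold Spec_multiepitope_vaccine; infer_instance

-- ===== CLAIM (what is proved, stated in full; the proofs are below) =====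
def Claim_equal_multiepitope_vaccine : Prop := ∀ (components : List (String × List String)) (order : List String) (start : String), Dom_multiepitope_vaccine components order start → Pre_multiepitope_vaccine components order start → Spec_multiepitope_vaccine components order start (multiepitope_vaccine components order start)

-- ===== LEMMAS AND PROOFS =====

-- proof-side abstraction: the Cartesian product of the selected components (leftmost slowest)
def pvProduct : List (List String) → List (List String)
  | [] => [[]]
  | c :: cs => c.flatMap (fun x => (pvProduct cs).map (fun t => x :: t))

-- proof-side: total number of combinations, and the mixed-radix decoding of an index
def pvPN (l : List (List String)) : Nat := (l.map List.length).prod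

def pvDigits : List (List String) → Nat → List String
  | [], _ => []
  | c :: cs, m => c.getD ((m / pvPN cs) % c.length) "" :: pvDigits cs m

-- the join over "" is plain concatenation
theorem flatten_intersperse_nil (l : List (List Char)) : (List.intersperse ([]:List Char) l).flatten = l.flatten := by
  induction l with
  | nil => rfl
  | cons a t ih => cases t <;> simp_all [List.intersperse]

theorem join_empty_cons (x : String) (t : List String) : PySem.Str.join "" (x :: t) = x ++ PySem.Str.join "" t := by
  simp [PySem.Str.join, PySem.Chars.join, List.intercalate, flatten_intersperse_nil, String.ofList_append, String.ofList_toList]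

theorem join_empty_nil : PySem.Str.join "" [] = "" := rfl

theorem flatten_map_singleton (l : List String) : (l.map (fun x => [x])).flatten = l := by
  induction l <;> simp_all

-- A's inner foldl shapes
theorem epitope_combinations_eq (i : String) (c : List String) :
    epitope_combinations i c = c.map (fun x => i ++ x) := by
  unfold epitope_combinations
  suffices h : ∀ acc : List String, c.foldl (fun ns x => ns ++ [i ++ x]) acc = acc ++ c.map (fun x => i ++ x) by
    simpa using h []
  induction c with
  | nil => simp
  | cons a t ih => intro acc; simp [ih]

-- A's step, abstracted over the looked-up component
def pvStep (sub c : List String) : List String :=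
  if c = [] then sub else if sub = [] then c else sub.flatMap (fun i => c.map (fun x => i ++ x))

theorem foldl_step_eq (components : List (String × List String)) (order : List String) (s : List String) :
    order.foldl (fun subunit k =>
      let comp_j := pvLookup components k
      if comp_j.length == 0 then subunit
      else if subunit.length == 0 then comp_j.foldl (fun t i => t ++ [i]) subunit
      else subunit.foldl (fun new_ls i => new_ls ++ epitope_combinations i comp_j) []) s =
    (order.map (fun k => pvLookup components k)).foldl pvStep s := by
  induction order generalizing s with
  | nil => rfl
  | cons k t ih =>
      simp only [List.foldl_cons, List.map_cons]
      rw [ih]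
      congr 1
      unfold pvStep
      rcases hc : pvLookup components k with _ | ⟨x, xs⟩ <;>
      rcases hs : s with _ | ⟨y, ys⟩ <;>
        simp [epitope_combinations_eq, List.flatMap_def, flatten_map_singleton]

-- empty components are skipped
theorem foldl_step_filter (l : List (List String)) (s : List String) :
    l.foldl pvStep s = (l.filter (fun c => 0 < c.length)).foldl pvStep s := by
  induction l generalizing s with
  | nil => rfl
  | cons c t ih =>
      by_cases hc : c = []
      · subst hc; simpa [pvStep] using ih s
      · have : 0 < c.length := List.length_pos_iff.mpr hc
        simp [this, ih]

-- main A-side invariant: from a non-empty subunit, folding over non-empty components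
-- yields the prefixed Cartesian product
theorem foldl_step_prod (sel : List (List String)) (s : List String)
    (hs : s ≠ []) (hsel : ∀ c ∈ sel, c ≠ []) :
    sel.foldl pvStep s = s.flatMap (fun i => (pvProduct sel).map (fun t => i ++ PySem.Str.join "" t)) := by
  induction sel generalizing s with
  | nil => simp [pvProduct, join_empty_nil]
  | cons c cs ih =>
      have hc : c ≠ [] := hsel c (by simp)
      have hstep : pvStep s c = s.flatMap (fun i => c.map (fun x => i ++ x)) := by
        simp [pvStep, hs, hc]
      have hne : s.flatMap (fun i => c.map (fun x => i ++ x)) ≠ [] := by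
        rcases List.exists_mem_of_ne_nil s hs with ⟨i, hi⟩
        rcases List.exists_mem_of_ne_nil c hc with ⟨x, hx⟩
        intro h
        have : (i ++ x) ∈ s.flatMap (fun i => c.map (fun x => i ++ x)) :=
          List.mem_flatMap.mpr ⟨i, hi, List.mem_map_of_mem hx⟩
        simp [h] at this
      simp only [List.foldl_cons, hstep]
      rw [ih _ hne (fun d hd => hsel d (by simp [hd]))]
      simp only [pvProduct, List.flatMap_assoc, List.flatMap_map, List.map_flatMap, List.map_map]
      simp [Function.comp_def, join_empty_cons, String.append_assoc]

theorem foldl_step_from_nil (sel : List (List String)) (hsel : ∀ c ∈ sel, c ≠ []) (hne : sel ≠ []) :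
    sel.foldl pvStep [] = (pvProduct sel).map (fun t => PySem.Str.join "" t) := by
  cases sel with
  | nil => exact absurd rfl hne
  | cons c cs =>
      have hc : c ≠ [] := hsel c (by simp)
      have h1 : pvStep [] c = c := by simp [pvStep, hc]
      simp only [List.foldl_cons, h1]
      rw [foldl_step_prod cs c hc (fun d hd => hsel d (by simp [hd]))]
      simp [pvProduct, List.map_flatMap, List.map_map, Function.comp_def, join_empty_cons]

-- ===== B-side lemmas =====

theorem pvPN_cons (c : List String) (cs : List (List String)) :
    pvPN (c :: cs) = c.length * pvPN cs := by simp [pvPN]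

theorem pvPN_pos (cs : List (List String)) (h : ∀ c ∈ cs, c ≠ []) : 0 < pvPN cs := by
  induction cs with
  | nil => simp [pvPN]
  | cons c t ih =>
      rw [pvPN_cons]
      exact Nat.mul_pos (List.length_pos_iff.mpr (h c (by simp))) (ih (fun d hd => h d (by simp [hd])))

-- the port's total is the product of the lengths
theorem total_eq (sel : List (List String)) (acc : Int) :
    sel.foldl (fun p c => p * PySem.List.len c) acc = acc * (pvPN sel : Int) := by
  induction sel generalizing acc with
  | nil => simp [pvPN]
  | cons c t ih =>
      rw [List.foldl_cons, ih, pvPN_cons, PySem.List.len_eq]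
      push_cast; ring

-- the port's inner fold decodes the index into the reversed list of mixed-radix digits
theorem inner_fold_eq (cs : List (List String)) (m : Nat) (acc : List String) :
    cs.reverse.foldl
      (fun (st : Int × List String) c =>
        (PySem.Int.floordiv st.1 (PySem.List.len c),
         st.2 ++ [PySem.List.pyGetD c (PySem.Int.mod st.1 (PySem.List.len c)) ""]))
      ((m : Int), acc) =
    (((m / pvPN cs : Nat) : Int), acc ++ (pvDigits cs m).reverse) := by
  induction cs generalizing acc with
  | nil => simp [pvPN, pvDigits]
  | cons c cs ih =>
      rw [List.reverse_cons, List.foldl_append, ih]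
      simp only [List.foldl_cons, List.foldl_nil, PySem.List.len_eq,
        PySem.Int.floordiv_natCast, PySem.Int.mod_natCast, PySem.List.pyGetD_natCast]
      refine Prod.ext ?_ ?_
      · simp [pvPN_cons, Nat.div_div_eq_div_mul, Nat.mul_comm]
      · simp [pvDigits, List.getD]

-- the decoding only depends on the index modulo the total
theorem pvDigits_mod (cs : List (List String)) (m : Nat) :
    pvDigits cs (m % pvPN cs) = pvDigits cs m := by
  induction cs generalizing m with
  | nil => rfl
  | cons c cs ih =>
      simp only [pvDigits, pvPN_cons]
      congr 1
      · rw [Nat.mul_comm, Nat.mod_mul_right_div_self, Nat.mod_mod_of_dvd _ dvd_rfl]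
      · rw [← ih (m % (c.length * pvPN cs)), Nat.mod_mod_of_dvd m (dvd_mul_left _ _), ih]

-- splitting range (a*b) into a blocks of size b
theorem range_mul_map {α : Type} (a b : Nat) (f : Nat → α) :
    (List.range (a * b)).map f =
    (List.range a).flatMap (fun i => (List.range b).map (fun j => f (i * b + j))) := by
  induction a with
  | zero => simp
  | succ a ih =>
      rw [Nat.succ_mul, List.range_add, List.range_succ]
      simp [ih, List.map_map, Function.comp_def]

theorem map_getD_range (xs : List String) :
    (List.range xs.length).map (fun i => xs.getD i "") = xs := by
  apply List.ext_getElem (by simp)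
  intro i h1 h2
  simp [List.getD_eq_getElem?_getD, List.getElem?_eq_getElem h2]

-- enumerating all indices and decoding them yields the Cartesian product in A's order
theorem enum_eq_product (cs : List (List String)) (h : ∀ c ∈ cs, c ≠ []) :
    (List.range (pvPN cs)).map (pvDigits cs) = pvProduct cs := by
  induction cs with
  | nil => simp [pvPN, pvDigits, pvProduct]
  | cons c cs ih =>
      have hP : 0 < pvPN cs := pvPN_pos cs (fun d hd => h d (by simp [hd]))
      rw [pvPN_cons, range_mul_map]
      have hblock : ∀ i ∈ List.range c.length,
          (List.range (pvPN cs)).map (fun j => pvDigits (c :: cs) (i * pvPN cs + j)) =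
          (pvProduct cs).map (fun t => c.getD i "" :: t) := by
        intro i hi
        have hi' : i < c.length := List.mem_range.mp hi
        rw [← ih (fun d hd => h d (by simp [hd])), List.map_map]
        apply List.map_congr_left
        intro j hj
        have hj' : j < pvPN cs := List.mem_range.mp hj
        simp only [pvDigits, Function.comp_def]
        congr 1
        · rw [Nat.mul_comm i (pvPN cs), Nat.mul_add_div hP, Nat.div_eq_of_lt hj',
            Nat.add_zero, Nat.mod_eq_of_lt hi']
        · rw [← pvDigits_mod, Nat.mul_comm i (pvPN cs), Nat.mul_add_mod,
            Nat.mod_eq_of_lt hj']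
      rw [List.flatMap_congr hblock]
      conv_rhs => rw [pvProduct, ← map_getD_range c]
      simp [List.flatMap_map]

-- ===== VERDICT (by name: the statement is the Claim_ definition above) =====
theorem multiepitope_vaccine_spec : Claim_equal_multiepitope_vaccine := by
  intro components order start _hDom _hPre
  unfold Spec_multiepitope_vaccine multiepitope_vaccine multiepitope_vaccine_alt
  rw [foldl_step_eq, foldl_step_filter]
  set sel := (order.map (fun k => pvLookup components k)).filter (fun c => 0 < c.length) with hsel
  have hne : ∀ c ∈ sel, c ≠ [] := by
    intro c hc
    have := List.of_mem_filter hc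
    simp only [decide_eq_true_eq] at this
    exact List.length_pos_iff.mp (by simpa using this)
  by_cases h : sel.isEmpty
  · have : sel = [] := List.isEmpty_iff.mp h
    simp [this]
  · have hn : sel ≠ [] := fun hnil => h (by simp [hnil])
    rw [foldl_step_from_nil sel hne hn]
    simp only [h, if_neg, Bool.false_eq_true, not_false_iff]
    rw [total_eq sel 1, one_mul, PySem.List.pyRange_zero_natCast, List.map_map, List.map_map]
    apply Eq.symm
    rw [← enum_eq_product sel hne, List.map_map]
    apply List.map_congr_left
    intro m _
    simp only [Function.comp_def]
    rw [inner_fold_eq sel m []]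
    simp
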